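-- pv_equiv track=rewrite | github.com/Arsen1302/Code-copy-detector | TestData/solutions/problem_1051_2.py | solution_1051_2
-- ===== SOURCE A (Python) =====
-- from typing import List
--
-- def solution_1051_2(nums: List[int]) -> int:
--     x = sum(nums)
--     count = 0
--     while x != 0:
--         for i in range(len(nums)):
--             if nums[i] % 2 != 0:
--                 count += 1
--                 x -= 1
--         if x != 0:
--             for i in range(len(nums)):
--                 if nums[i] != 0:
--                     nums[i] //= 2
--                     x -= nums[i]
--             count += 1
--     return count
-- ===== SOURCE B (Python) =====
-- from typing import List
--
-- def solution_1051_2(nums: List[int]) -> int: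
--     s = sum(nums)
--     if s == 0:
--         return 0
--     return sum(bin(v).count('1') for v in nums) + (max(nums).bit_length() - 1)
-- ===== Notes on version B (the rewrite author's own statement) =====
-- stated objective: alternative
-- what changed: Replaces A's round-by-round simulation (repeatedly scanning the array, decrementing odds and halving) by the closed form: total popcount of the elements plus bit_length(max)-1, computed in one pass.
-- outside the precondition, e.g. on solution_1051_2([-2, 3]): A returns 1, B returns 4; on solution_1051_2([-1, -1]): A does not finish within the time limit, B returns 2
import Mathlib
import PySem

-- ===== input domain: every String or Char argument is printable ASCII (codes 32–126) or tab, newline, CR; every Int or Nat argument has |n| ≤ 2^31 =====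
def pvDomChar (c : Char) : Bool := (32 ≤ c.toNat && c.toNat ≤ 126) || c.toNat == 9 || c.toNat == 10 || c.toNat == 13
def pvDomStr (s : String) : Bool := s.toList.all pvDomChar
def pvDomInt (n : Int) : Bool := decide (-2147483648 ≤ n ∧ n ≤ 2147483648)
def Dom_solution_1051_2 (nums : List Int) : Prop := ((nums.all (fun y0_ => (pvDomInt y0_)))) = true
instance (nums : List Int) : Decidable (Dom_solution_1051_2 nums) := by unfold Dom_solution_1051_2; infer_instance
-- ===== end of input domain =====

-- B replaces A's round-by-round simulation by the closed form  total popcount + (bit_length(max) - 1),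
-- computed in one pass over the list.  A mutates nums in place (halving its entries); the
-- equivalence proved is about the RETURN value only (B does not mutate).

-- ===== PORT A =====
-- inner 'for i in range(len(nums))' loops ported as the structural recursion over the list
-- (each iteration reads/writes only index i, so the index loop is exactly this traversal);
-- state (x, count) resp. (nums, x) is the Python state.
def pvPhase1 : List Int → Int × Int → Int × Int
  | [], s => s
  | n :: t, (x, c) =>
      pvPhase1 t (if PySem.Int.mod n 2 ≠ 0 then (x - 1, c + 1) else (x, c))

def pvPhase2 : List Int → Int → List Int × Int
  | [], x => ([], x)
  | n :: t, x =>
      if n ≠ 0 then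
        let m := PySem.Int.floordiv n 2
        let r := pvPhase2 t (x - m)
        (m :: r.1, r.2)
      else
        let r := pvPhase2 t x
        (n :: r.1, r.2)

-- the 'while x != 0' loop; fuel only makes it total (Pre_ guarantees enough fuel: x strictly decreases)
def pvLoop : Nat → List Int → Int → Int → Int
  | 0, _, _, count => count
  | fuel + 1, nums, x, count =>
      if x = 0 then count
      else
        let p := pvPhase1 nums (x, count)
        if p.1 ≠ 0 then
          let q := pvPhase2 nums p.1
          pvLoop fuel q.1 q.2 (p.2 + 1)
        else p.2

def solution_1051_2 (nums : List Int) : Int :=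
  pvLoop (nums.sum.toNat + 1) nums nums.sum 0

-- ===== PORT B =====
-- bin(v).count('1') = PySem.Int.bitCount, .bit_length() = PySem.Int.bitLength;
-- max(nums) = PySem.List.max?, only read when s ≠ 0 (so the list is nonempty), getD 0 is never the default.
def solution_1051_2_alt (nums : List Int) : Int :=
  let s := nums.sum
  if s = 0 then 0
  else (nums.map (fun v => (PySem.Int.bitCount v : Int))).sum
       + ((PySem.Int.bitLength ((PySem.List.max? nums (fun x => x)).getD 0) : Int) - 1)

-- ===== PRECONDITION & SPEC =====
-- Pre_ restricts to the problem's natural domain, lists of nonnegative integers: with a negative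
-- element A's simulation may diverge (e.g. [-1,-1]) and, where it happens to return, the count is an
-- artefact of simulating on a meaningless domain (e.g. A returns 1 on [-2,3]).
def Pre_solution_1051_2 (nums : List Int) : Prop := ∀ a ∈ nums, 0 ≤ a
instance (nums : List Int) : Decidable (Pre_solution_1051_2 nums) := by unfold Pre_solution_1051_2; infer_instance
def pvWitness_solution_1051_2 : List Int := [3, 0, 5, 8]

def Spec_solution_1051_2 (nums : List Int) (out : Int) : Prop := out = solution_1051_2_alt nums
instance (nums : List Int) (out : Int) : Decidable (Spec_solution_1051_2 nums out) := by unfold Spec_solution_1051_2; infer_instance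

-- ===== CLAIM (what is proved, stated in full; the proofs are below) =====
def Claim_equal_solution_1051_2 : Prop := ∀ (nums : List Int), Dom_solution_1051_2 nums → Pre_solution_1051_2 nums → Spec_solution_1051_2 nums (solution_1051_2 nums)

-- ===== LEMMAS AND PROOFS =====

-- number of odd elements, as the value pvPhase1 accumulates
def pvOdds (l : List Int) : Int := (l.map (fun n => if PySem.Int.mod n 2 ≠ 0 then (1 : Int) else 0)).sum
-- the halved list pvPhase2 produces
def pvHalf (l : List Int) : List Int := l.map (fun n => PySem.Int.floordiv n 2)
-- the max value B reads
def pvMaxV (l : List Int) : Int := (PySem.List.max? l (fun x => x)).getD 0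

theorem pvPhase1_eq : ∀ (l : List Int) (x c : Int), pvPhase1 l (x, c) = (x - pvOdds l, c + pvOdds l) := by
  intro l
  induction l with
  | nil => intro x c; simp [pvPhase1, pvOdds]
  | cons n t ih =>
      intro x c
      simp only [pvPhase1, pvOdds, List.map_cons, List.sum_cons]
      by_cases h : PySem.Int.mod n 2 ≠ 0
      · rw [if_pos h, if_pos h, ih]
        simp only [pvOdds, Prod.mk.injEq]
        constructor <;> ring
      · rw [if_neg h, if_neg h, ih]
        simp only [pvOdds, Prod.mk.injEq]
        constructor <;> ring

theorem pvPhase2_eq : ∀ (l : List Int) (x : Int), pvPhase2 l x = (pvHalf l, x - (pvHalf l).sum) := by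
  intro l
  induction l with
  | nil => intro x; simp [pvPhase2, pvHalf]
  | cons n t ih =>
      intro x
      by_cases h : n = 0
      · subst h
        have h0 : PySem.Int.floordiv 0 2 = 0 := by decide
        simp [pvPhase2, pvHalf, ih]
      · simp only [pvPhase2, if_pos h, ih]
        simp [pvHalf]
        ring
  
theorem pv_mod2_cases (n : Int) : PySem.Int.mod n 2 = 0 ∨ PySem.Int.mod n 2 = 1 := by
  have h1 := PySem.Int.mod_nonneg n (b := 2) (by norm_num)
  have h2 := PySem.Int.mod_lt n (b := 2) (by norm_num)
  omega

theorem pv_sum_decomp : ∀ (l : List Int), l.sum = 2 * (pvHalf l).sum + pvOdds l := by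
  intro l
  induction l with
  | nil => simp [pvHalf, pvOdds]
  | cons n t ih =>
      have hd := PySem.Int.floordiv_mul_add_mod n 2
      have hm := pv_mod2_cases n
      simp only [List.sum_cons, pvHalf, pvOdds, List.map_cons] at *
      by_cases h : PySem.Int.mod n 2 ≠ 0
      · rw [if_pos h]; omega
      · rw [if_neg h]; omega

theorem pv_floordiv2_nonneg {n : Int} (h : 0 ≤ n) : 0 ≤ PySem.Int.floordiv n 2 := by
  rw [PySem.Int.floordiv_eq_ediv_of_pos (by norm_num)]
  exact Int.ediv_nonneg h (by norm_num)

theorem pv_floordiv2_mono {a b : Int} (h : a ≤ b) : PySem.Int.floordiv a 2 ≤ PySem.Int.floordiv b 2 := by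
  rw [PySem.Int.floordiv_eq_ediv_of_pos (by norm_num), PySem.Int.floordiv_eq_ediv_of_pos (by norm_num)]
  exact Int.ediv_le_ediv (by norm_num) h

theorem pv_half_nonneg {l : List Int} (h : ∀ a ∈ l, 0 ≤ a) : ∀ a ∈ pvHalf l, 0 ≤ a := by
  intro a ha
  simp only [pvHalf, List.mem_map] at ha
  obtain ⟨n, hn, rfl⟩ := ha
  exact pv_floordiv2_nonneg (h n hn)

theorem pv_sum_nonneg {l : List Int} (h : ∀ a ∈ l, 0 ≤ a) : 0 ≤ l.sum := by
  induction l with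
  | nil => simp
  | cons n t ih =>
      simp only [List.sum_cons]
      have := h n (by simp)
      have := ih (fun a ha => h a (by simp [ha]))
      omega

theorem pv_odds_nonneg (l : List Int) : 0 ≤ pvOdds l := by
  induction l with
  | nil => simp [pvOdds]
  | cons n t ih =>
      simp only [pvOdds, List.map_cons, List.sum_cons] at *
      by_cases h : PySem.Int.mod n 2 ≠ 0
      · rw [if_pos h]; omega
      · rw [if_neg h]; omega

theorem pv_sum_zero_all_zero {l : List Int} (h : ∀ a ∈ l, 0 ≤ a) (hs : l.sum = 0) :
    ∀ a ∈ l, a = 0 := by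
  induction l with
  | nil => simp
  | cons n t ih =>
      simp only [List.sum_cons] at hs
      have hn := h n (by simp)
      have ht := pv_sum_nonneg (fun b hb => h b (List.mem_cons_of_mem _ hb))
      intro a ha
      rcases List.mem_cons.mp ha with rfl | ha'
      · omega
      · exact ih (fun b hb => h b (List.mem_cons_of_mem _ hb)) (by omega) a ha'

-- popcount decomposition over one halving round
theorem pv_bitcount_step {n : Int} (h : 0 ≤ n) :
    (PySem.Int.bitCount n : Int) = (if PySem.Int.mod n 2 ≠ 0 then (1 : Int) else 0) + PySem.Int.bitCount (PySem.Int.floordiv n 2) := by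
  rcases lt_or_eq_of_le h with hp | hz
  · have hb := PySem.Int.bitCount_of_pos (n := n) hp
    rcases pv_mod2_cases n with hm | hm <;> rw [hb, hm] <;> norm_num
  · subst hz
    decide

theorem pv_bitcount_sum {l : List Int} (h : ∀ a ∈ l, 0 ≤ a) :
    (l.map (fun v => (PySem.Int.bitCount v : Int))).sum
      = pvOdds l + ((pvHalf l).map (fun v => (PySem.Int.bitCount v : Int))).sum := by
  induction l with
  | nil => simp [pvOdds, pvHalf]
  | cons n t ih =>
      have hstep := pv_bitcount_step (h n (by simp))
      have iht := ih (fun a ha => h a (by simp [ha]))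
      simp only [List.map_cons, List.sum_cons, pvOdds, pvHalf] at *
      omega

-- the value B reads from max? is a member and an upper bound (nonempty list)
theorem pv_maxV_spec {l : List Int} (h : l ≠ []) : pvMaxV l ∈ l ∧ ∀ y ∈ l, y ≤ pvMaxV l := by
  unfold pvMaxV
  rcases hm : PySem.List.max? l (fun x => x) with _ | m
  · exact absurd ((PySem.List.max?_eq_none_iff l (fun x => x)).mp hm) h
  · exact ⟨PySem.List.max?_mem hm, fun y hy => PySem.List.max?_isMax hm y hy⟩

theorem pv_maxV_half {l : List Int} (h : l ≠ []) :
    pvMaxV (pvHalf l) = PySem.Int.floordiv (pvMaxV l) 2 := by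
  have h' : pvHalf l ≠ [] := by
    cases l with
    | nil => exact absurd rfl h
    | cons n t => simp [pvHalf]
  obtain ⟨hmem, hub⟩ := pv_maxV_spec h
  obtain ⟨hmem', hub'⟩ := pv_maxV_spec h'
  apply le_antisymm
  · set M := pvMaxV (pvHalf l) with hM
    simp only [pvHalf, List.mem_map] at hmem'
    obtain ⟨y, hy, hval⟩ := hmem'
    rw [← hval]
    exact pv_floordiv2_mono (hub y hy)
  · exact hub' _ (by simp only [pvHalf, List.mem_map]; exact ⟨pvMaxV l, hmem, rfl⟩)

theorem pv_half_sum_pos_max_ge_two {l : List Int} (h : ∀ a ∈ l, 0 ≤ a)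
    (hs : 0 < (pvHalf l).sum) : 2 ≤ pvMaxV l := by
  have hne : l ≠ [] := by rintro rfl; simp [pvHalf] at hs
  obtain ⟨hmem, hub⟩ := pv_maxV_spec hne
  -- some element of pvHalf l is positive
  have hex : ∃ a ∈ pvHalf l, 0 < a := by
    by_contra hcon
    push_neg at hcon
    have hz : (pvHalf l).sum = 0 :=
      List.sum_eq_zero (fun a ha => le_antisymm (hcon a ha) (pv_half_nonneg h a ha))
    omega
  obtain ⟨a, ha, hap⟩ := hex
  simp only [pvHalf, List.mem_map] at ha
  obtain ⟨n, hn, rfl⟩ := ha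
  have hn0 := h n hn
  have h2 : 2 ≤ n := by
    by_contra hc
    push_neg at hc
    interval_cases n
    · simp at hap
    · simp at hap
  exact le_trans h2 (hub n hn)

theorem pv_all_le_one_sum_ne {l : List Int} (h : ∀ a ∈ l, 0 ≤ a)
    (h1 : ∀ a ∈ l, a ≤ 1) (hs : l.sum ≠ 0) :
    solution_1051_2_alt l = l.sum := by
  have hne : l ≠ [] := by rintro rfl; simp at hs
  obtain ⟨hmem, hub⟩ := pv_maxV_spec hne
  have hmax1 : pvMaxV l = 1 := by
    rcases lt_or_eq_of_le (h _ hmem) with hp | hz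
    · have := h1 _ hmem; omega
    · exact absurd (List.sum_eq_zero (fun a ha =>
        le_antisymm (by have := hub a ha; omega) (h a ha))) hs
  have hcnt : ∀ a ∈ l, (fun v => (PySem.Int.bitCount v : Int)) a = id a := by
    intro a ha
    have := h a ha; have := h1 a ha
    simp only [id]
    interval_cases a <;> decide
  have hsum : (l.map (fun v => (PySem.Int.bitCount v : Int))).sum = l.sum := by
    rw [List.map_congr_left hcnt, List.map_id]
  simp only [solution_1051_2_alt, if_neg hs, hsum]
  rw [show (PySem.List.max? l fun x => x).getD 0 = pvMaxV l from rfl, hmax1]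
  norm_num [show PySem.Int.bitLength 1 = 1 from by decide]

-- one halving round of B's closed form
theorem pv_alt_step {l : List Int} (h : ∀ a ∈ l, 0 ≤ a) (hs : 0 < (pvHalf l).sum) :
    solution_1051_2_alt l = pvOdds l + 1 + solution_1051_2_alt (pvHalf l) := by
  have hsum := pv_sum_decomp l
  have hodds0 := pv_odds_nonneg l
  have hlsum : l.sum ≠ 0 := by omega
  have hhs : (pvHalf l).sum ≠ 0 := by omega
  have hmax2 := pv_half_sum_pos_max_ge_two h hs
  have hne : l ≠ [] := by rintro rfl; simp [pvHalf] at hs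
  have hbl : PySem.Int.bitLength (pvMaxV l) = PySem.Int.bitLength (PySem.Int.floordiv (pvMaxV l) 2) + 1 :=
    PySem.Int.bitLength_of_pos (by omega)
  simp only [solution_1051_2_alt, if_neg hlsum, if_neg hhs]
  rw [pv_bitcount_sum h]
  rw [show (PySem.List.max? (pvHalf l) fun x => x).getD 0 = pvMaxV (pvHalf l) from rfl,
      show (PySem.List.max? l fun x => x).getD 0 = pvMaxV l from rfl,
      pv_maxV_half hne, hbl]
  push_cast
  ring

theorem pv_loop_spec : ∀ (fuel : Nat) (l : List Int) (c : Int),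
    (∀ a ∈ l, 0 ≤ a) → l.sum.toNat < fuel →
    pvLoop fuel l l.sum c = c + solution_1051_2_alt l := by
  intro fuel
  induction fuel with
  | zero => intro l c h hf; omega
  | succ f ih =>
      intro l c h hf
      by_cases hz : l.sum = 0
      · simp [pvLoop, hz, solution_1051_2_alt]
      · have hpos : 0 < l.sum := lt_of_le_of_ne (pv_sum_nonneg h) (Ne.symm hz)
        have hdecomp := pv_sum_decomp l
        have hodds := pv_odds_nonneg l
        have hhalfnn := pv_sum_nonneg (pv_half_nonneg h)
        simp only [pvLoop, if_neg hz, pvPhase1_eq, pvPhase2_eq]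
        set S' := (pvHalf l).sum with hS'
        have hx1 : l.sum - pvOdds l = 2 * S' := by omega
        by_cases hx : l.sum - pvOdds l = 0
        · -- while-exit after the decrement pass: every element is 0 or 1
          have hS0 : S' = 0 := by omega
          have hall0 : ∀ a ∈ pvHalf l, a = 0 :=
            pv_sum_zero_all_zero (pv_half_nonneg h) hS0
          have h1 : ∀ a ∈ l, a ≤ 1 := by
            intro a ha
            have h0 : PySem.Int.floordiv a 2 = 0 :=
              hall0 _ (by simp only [pvHalf, List.mem_map]; exact ⟨a, ha, rfl⟩)
            rw [PySem.Int.floordiv_eq_ediv_of_pos (by norm_num)] at h0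
            have := h a ha
            omega
          have halt := pv_all_le_one_sum_ne h h1 hz
          have hodds_eq : pvOdds l = l.sum := by
            have hbc := pv_bitcount_sum h
            have hz0 : ((pvHalf l).map (fun v => (PySem.Int.bitCount v : Int))).sum = 0 :=
              List.sum_eq_zero (by
                intro v hv
                simp only [List.mem_map] at hv
                obtain ⟨w, hw, rfl⟩ := hv
                rw [hall0 w hw]
                decide)
            omega
          simp [halt, ← hodds_eq]
        · -- halving round, recurse on the halved list
          have hS'pos : 0 < S' := by omega
          have hIH := ih (pvHalf l) (c + pvOdds l + 1) (pv_half_nonneg h)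
            (by omega)
          rw [if_pos hx]
          have harg : l.sum - pvOdds l - S' = S' := by omega
          rw [harg, hIH]
          rw [pv_alt_step h hS'pos]
          ring

-- ===== VERDICT (by name: the statement is the Claim_ definition above) =====
theorem solution_1051_2_spec : Claim_equal_solution_1051_2 := by
  intro nums _ hpre
  unfold Spec_solution_1051_2 solution_1051_2
  rw [pv_loop_spec (nums.sum.toNat + 1) nums 0 hpre (by omega)]
  ring
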